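-- pv_equiv track=rewrite | github.com/Chun-Bae/Baekjoon | Python/백준/Silver/20546. 🐜 기적의 매매법 🐜/🐜 기적의 매매법 🐜.py | bnp_vs_timing
-- ===== SOURCE A (Python) =====
-- def bnp_vs_timing(cash, prices):
--     bnp_cash = cash
--     bnp_stocks = 0
--
--     for price in prices:
--         if bnp_cash >= price:
--             bnp_stocks += bnp_cash // price
--             bnp_cash %= price
--
--     bnp_total = bnp_cash + bnp_stocks * prices[-1]
--
--     timing_cash = cash
--     timing_stocks = 0
--     up_days = 0
--     down_days = 0
--
--     for i in range(1, len(prices)):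
--         if prices[i] > prices[i - 1]:
--             up_days += 1
--             down_days = 0
--         elif prices[i] < prices[i - 1]:
--             down_days += 1
--             up_days = 0
--         else:
--             up_days = 0
--             down_days = 0
--
--         if up_days >= 3 and timing_stocks > 0:
--             timing_cash += timing_stocks * prices[i]
--             timing_stocks = 0
--
--         elif down_days >= 3 and timing_cash >= prices[i]:
--             timing_stocks += timing_cash // prices[i]
--             timing_cash %= prices[i]
--
--     timing_total = timing_cash + timing_stocks * prices[-1]
--
--     if bnp_total > timing_total:
--         return "BNP"
--     elif bnp_total < timing_total:
--         return "TIMING"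
--     else:
--         return "SAMESAME"
-- ===== SOURCE B (Python) =====
-- def _run_end(prices, j, up):
--     n = len(prices)
--     while j + 1 < n and ((prices[j + 1] > prices[j]) if up else (prices[j + 1] < prices[j])):
--         j += 1
--     return j
--
--
-- def bnp_vs_timing(cash, prices):
--     last = prices[-1]
--     n = len(prices)
--
--     c, s = cash, 0
--     for p in prices:
--         if c >= p:
--             s += c // p
--             c %= p
--     bnp_total = c + s * last
--
--     # stage 1: cut the series into maximal strictly monotone runs and emit the
--     # trade events they trigger (third step of a run onward)
--     events = []
--     i = 1
--     while i < n:
--         if prices[i] > prices[i - 1]: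
--             j = _run_end(prices, i, True)
--             events += [(k, True) for k in range(i + 2, j + 1)]
--         elif prices[i] < prices[i - 1]:
--             j = _run_end(prices, i, False)
--             events += [(k, False) for k in range(i + 2, j + 1)]
--         else:
--             j = i
--         i = j + 1
--
--     # stage 2: replay the events
--     c, s = cash, 0
--     for k, is_sell in events:
--         p = prices[k]
--         if is_sell:
--             if s > 0:
--                 c += s * p
--                 s = 0
--         elif c >= p:
--             s += c // p
--             c %= p
--     timing_total = c + s * last
--
--     if bnp_total > timing_total:
--         return "BNP"
--     if bnp_total < timing_total:
--         return "TIMING"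
--     return "SAMESAME"
-- ===== Notes on version B (the rewrite author's own statement) =====
-- stated objective: alternative
-- what changed: The day-by-day timing simulation with up_days/down_days counters is replaced by two staged passes: a run-decomposition pass that cuts the price series into maximal strictly monotone runs and emits explicit trade events (from the third step of each run on), and a replay pass that folds the trades over that event list.
-- outside the precondition, e.g. on bnp_vs_timing(-5, [0, 1, 2, 3]): A returns 'SAMESAME', B returns 'SAMESAME'
import Mathlib
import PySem

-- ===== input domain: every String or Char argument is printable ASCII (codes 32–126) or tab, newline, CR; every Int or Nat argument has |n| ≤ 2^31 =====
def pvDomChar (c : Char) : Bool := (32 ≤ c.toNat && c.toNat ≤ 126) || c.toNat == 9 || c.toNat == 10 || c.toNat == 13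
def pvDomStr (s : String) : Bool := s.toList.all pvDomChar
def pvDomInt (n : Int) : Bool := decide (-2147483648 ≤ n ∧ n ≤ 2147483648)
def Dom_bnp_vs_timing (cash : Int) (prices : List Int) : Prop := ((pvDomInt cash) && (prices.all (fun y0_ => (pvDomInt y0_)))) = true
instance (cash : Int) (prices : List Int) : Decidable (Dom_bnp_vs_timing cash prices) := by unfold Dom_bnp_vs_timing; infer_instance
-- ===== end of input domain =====

-- B replaces the counter-based timing simulation by two staged passes: a run-decomposition pass emitting explicit trade events, then an event-replay fold; same result, different decomposition.


-- ===== PORT A =====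
-- A's timing-loop body: state ((cash, stocks), (up_days, down_days)), index i
def pvAStep (prices : List Int) (st : (Int × Int) × Int × Int) (i : Int) : (Int × Int) × Int × Int :=
  let p := PySem.List.pyGetD prices i 0
  let q := PySem.List.pyGetD prices (i - 1) 0
  let ud : Int × Int :=
    if p > q then (st.2.1 + 1, 0)
    else if p < q then (0, st.2.2 + 1)
    else (0, 0)
  if ud.1 ≥ 3 ∧ st.1.2 > 0 then ((st.1.1 + st.1.2 * p, 0), ud)
  else if ud.2 ≥ 3 ∧ st.1.1 ≥ p then
    ((PySem.Int.mod st.1.1 p, st.1.2 + PySem.Int.floordiv st.1.1 p), ud)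
  else (st.1, ud)

def bnp_vs_timing (cash : Int) (prices : List Int) : String :=
  let bnp := prices.foldl
    (fun (st : Int × Int) price =>
      if st.1 ≥ price then (PySem.Int.mod st.1 price, st.2 + PySem.Int.floordiv st.1 price)
      else st) (cash, 0)
  let bnp_total := bnp.1 + bnp.2 * PySem.List.pyGetD prices (-1) 0
  let timing := (PySem.List.pyRange 1 prices.length 1).foldl (pvAStep prices) ((cash, 0), 0, 0)
  let timing_total := timing.1.1 + timing.1.2 * PySem.List.pyGetD prices (-1) 0
  if bnp_total > timing_total then "BNP"
  else if bnp_total < timing_total then "TIMING"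
  else "SAMESAME"

-- ===== PORT B =====
-- price at Int index (in-range nonnegative indices only are used)
def pvG (prices : List Int) (i : Int) : Int := PySem.List.pyGetD prices i 0

-- Source B's _run_end: extend j while the next step continues the monotone run
def pvRunEnd (prices : List Int) (j : Nat) (up : Bool) : Nat :=
  if h : j + 1 < prices.length ∧
      (if up then pvG prices ((j : Int) + 1) > pvG prices (j : Int)
       else pvG prices ((j : Int) + 1) < pvG prices (j : Int)) then
    pvRunEnd prices (j + 1) up
  else j
termination_by prices.length - j
decreasing_by obtain ⟨h1, _⟩ := h; omega


-- run end never moves left (cited by pvEvents' termination proof)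
theorem pvRunEnd_ge (prices : List Int) (j : Nat) (up : Bool) : j ≤ pvRunEnd prices j up := by
  by_cases hc : j + 1 < prices.length ∧
      (if up then pvG prices ((j : Int) + 1) > pvG prices (j : Int)
       else pvG prices ((j : Int) + 1) < pvG prices (j : Int))
  · rw [pvRunEnd, dif_pos hc]
    have := pvRunEnd_ge prices (j + 1) up
    omega
  · rw [pvRunEnd, dif_neg hc]
termination_by prices.length - j
decreasing_by obtain ⟨h1, _⟩ := hc; omega

-- stage 1 of Source B: the event list (day index, is_sell), run by run
def pvEvents (prices : List Int) (i : Nat) : List (Int × Bool) :=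
  if _h : i < prices.length then
    if pvG prices (i : Int) > pvG prices ((i : Int) - 1) then
      let j := pvRunEnd prices i true
      (PySem.List.pyRange ((i : Int) + 2) ((j : Int) + 1) 1).map (fun k => (k, true))
        ++ pvEvents prices (j + 1)
    else if pvG prices (i : Int) < pvG prices ((i : Int) - 1) then
      let j := pvRunEnd prices i false
      (PySem.List.pyRange ((i : Int) + 2) ((j : Int) + 1) 1).map (fun k => (k, false))
        ++ pvEvents prices (j + 1)
    else pvEvents prices (i + 1)
  else []
termination_by prices.length - i
decreasing_by
  · have := pvRunEnd_ge prices i true; omega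
  · have := pvRunEnd_ge prices i false; omega
  · omega

-- stage 2 of Source B: replay one trade event
def pvApply (prices : List Int) (st : Int × Int) (e : Int × Bool) : Int × Int :=
  let p := pvG prices e.1
  if e.2 then
    if st.2 > 0 then (st.1 + st.2 * p, 0) else st
  else if st.1 ≥ p then
    (PySem.Int.mod st.1 p, st.2 + PySem.Int.floordiv st.1 p)
  else st

def bnp_vs_timing_alt (cash : Int) (prices : List Int) : String :=
  let last := PySem.List.pyGetD prices (-1) 0
  let bnp := prices.foldl
    (fun (st : Int × Int) p =>
      if st.1 ≥ p then (PySem.Int.mod st.1 p, st.2 + PySem.Int.floordiv st.1 p)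
      else st) (cash, 0)
  let bnp_total := bnp.1 + bnp.2 * last
  let timing := (pvEvents prices 1).foldl (pvApply prices) (cash, 0)
  let timing_total := timing.1 + timing.2 * last
  if bnp_total > timing_total then "BNP"
  else if bnp_total < timing_total then "TIMING"
  else "SAMESAME"

-- ===== PRECONDITION & SPEC =====
-- Pre_ excludes the empty list (prices[-1] raises IndexError) and lists containing a 0 price,
-- on which the '//'/'%' by that price can raise ZeroDivisionError; when cash stays negative A
-- still returns on such lists (see the cite), but the natural domain has nonzero prices.
def Pre_bnp_vs_timing (cash : Int) (prices : List Int) : Prop :=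
  prices ≠ [] ∧ (0 : Int) ∉ prices
instance (cash : Int) (prices : List Int) : Decidable (Pre_bnp_vs_timing cash prices) := by
  unfold Pre_bnp_vs_timing; infer_instance

def pvWitness_bnp_vs_timing : Int × List Int := (100, [1, 5, 4, 3, 2, 6])

def Spec_bnp_vs_timing (cash : Int) (prices : List Int) (out : String) : Prop := out = bnp_vs_timing_alt cash prices
instance (cash : Int) (prices : List Int) (out : String) : Decidable (Spec_bnp_vs_timing cash prices out) := by unfold Spec_bnp_vs_timing; infer_instance

-- ===== CLAIM (what is proved, stated in full; the proofs are below) =====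
def Claim_equal_bnp_vs_timing : Prop := ∀ (cash : Int) (prices : List Int), Dom_bnp_vs_timing cash prices → Pre_bnp_vs_timing cash prices → Spec_bnp_vs_timing cash prices (bnp_vs_timing cash prices)

-- ===== LEMMAS AND PROOFS =====

-- every step strictly inside a run continues it
theorem pvRunEnd_steps (prices : List Int) (j : Nat) (up : Bool) :
    ∀ k : Nat, j ≤ k → k < pvRunEnd prices j up →
      (if up then pvG prices ((k : Int) + 1) > pvG prices (k : Int)
       else pvG prices ((k : Int) + 1) < pvG prices (k : Int)) := by
  intro k hk hlt
  by_cases hc : j + 1 < prices.length ∧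
      (if up then pvG prices ((j : Int) + 1) > pvG prices (j : Int)
       else pvG prices ((j : Int) + 1) < pvG prices (j : Int))
  · rw [pvRunEnd, dif_pos hc] at hlt
    rcases Nat.eq_or_lt_of_le hk with rfl | hk'
    · exact hc.2
    · exact pvRunEnd_steps prices (j + 1) up k hk' hlt
  · rw [pvRunEnd, dif_neg hc] at hlt
    omega
termination_by prices.length - j
decreasing_by obtain ⟨h1, _⟩ := hc; omega

-- the step after a run does not continue it
theorem pvRunEnd_max (prices : List Int) (j : Nat) (up : Bool) :
    pvRunEnd prices j up + 1 < prices.length →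
      ¬ (if up then pvG prices ((pvRunEnd prices j up : Int) + 1) > pvG prices (pvRunEnd prices j up : Int)
         else pvG prices ((pvRunEnd prices j up : Int) + 1) < pvG prices (pvRunEnd prices j up : Int)) := by
  intro hlt
  by_cases hc : j + 1 < prices.length ∧
      (if up then pvG prices ((j : Int) + 1) > pvG prices (j : Int)
       else pvG prices ((j : Int) + 1) < pvG prices (j : Int))
  · rw [pvRunEnd, dif_pos hc] at hlt ⊢
    exact pvRunEnd_max prices (j + 1) up hlt
  · rw [pvRunEnd, dif_neg hc] at hlt ⊢
    intro hcontra
    exact hc ⟨hlt, hcontra⟩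
termination_by prices.length - j
decreasing_by obtain ⟨h1, _⟩ := hc; omega

theorem pvRunEnd_lt (prices : List Int) (j : Nat) (up : Bool) (h : j < prices.length) :
    pvRunEnd prices j up < prices.length := by
  by_cases hc : j + 1 < prices.length ∧
      (if up then pvG prices ((j : Int) + 1) > pvG prices (j : Int)
       else pvG prices ((j : Int) + 1) < pvG prices (j : Int))
  · rw [pvRunEnd, dif_pos hc]
    exact pvRunEnd_lt prices (j + 1) up hc.1
  · rw [pvRunEnd, dif_neg hc]
    exact h
termination_by prices.length - j
decreasing_by obtain ⟨h1, _⟩ := hc; omega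

-- A's step at an up-day, down-day, flat day
theorem pvAStep_up (prices : List Int) (c s u d : Int) (i : Int)
    (h : pvG prices i > pvG prices (i - 1)) :
    pvAStep prices ((c, s), (u, d)) i
      = ((if u + 1 ≥ 3 ∧ s > 0 then (c + s * pvG prices i, 0) else (c, s)), (u + 1, 0)) := by
  simp only [pvAStep, pvG] at *
  rw [if_pos h]
  dsimp only
  split_ifs <;> first | rfl | (exfalso; omega)

theorem pvAStep_down (prices : List Int) (c s u d : Int) (i : Int)
    (h : pvG prices i < pvG prices (i - 1)) :
    pvAStep prices ((c, s), (u, d)) i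
      = ((if d + 1 ≥ 3 ∧ c ≥ pvG prices i then
            (PySem.Int.mod c (pvG prices i), s + PySem.Int.floordiv c (pvG prices i))
          else (c, s)), (0, d + 1)) := by
  have hng : ¬ (PySem.List.pyGetD prices i 0 > PySem.List.pyGetD prices (i - 1) 0) := by
    simp only [pvG] at h; omega
  simp only [pvAStep, pvG] at h ⊢
  rw [if_neg hng, if_pos h]
  dsimp only
  split_ifs <;> first | rfl | (exfalso; omega)

theorem pvAStep_flat (prices : List Int) (c s u d : Int) (i : Int)
    (h : pvG prices i = pvG prices (i - 1)) :
    pvAStep prices ((c, s), (u, d)) i = ((c, s), (0, 0)) := by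
  have hng : ¬ (PySem.List.pyGetD prices i 0 > PySem.List.pyGetD prices (i - 1) 0) := by
    simp only [pvG] at h; omega
  have hnl : ¬ (PySem.List.pyGetD prices i 0 < PySem.List.pyGetD prices (i - 1) 0) := by
    simp only [pvG] at h; omega
  simp only [pvAStep, pvG] at h ⊢
  rw [if_neg hng, if_neg hnl]
  dsimp only
  split_ifs <;> first | rfl | (exfalso; omega)

-- replay of a single event
theorem pvApply_sell (prices : List Int) (c s x : Int) :
    pvApply prices (c, s) (x, true)
      = if s > 0 then (c + s * pvG prices x, 0) else (c, s) := rfl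

theorem pvApply_buy (prices : List Int) (c s x : Int) :
    pvApply prices (c, s) (x, false)
      = if c ≥ pvG prices x then
          (PySem.Int.mod c (pvG prices x), s + PySem.Int.floordiv c (pvG prices x))
        else (c, s) := rfl

-- inside an up run starting at day i, entering day k with counter k - i,
-- A's fold over the rest of the run replays exactly the sell events from day i+2 on
theorem pvTail_up (prices : List Int) (i j : Nat)
    (hsteps : ∀ t : Nat, i < t → t ≤ j → pvG prices (t : Int) > pvG prices ((t : Int) - 1)) :
    ∀ (len k : Nat) (c s : Int), i < k → k + len = j + 1 →
      (PySem.List.pyRange (k : Int) ((j : Int) + 1) 1).foldl (pvAStep prices)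
          ((c, s), ((k : Int) - (i : Int), 0))
        = (((PySem.List.pyRange ((max k (i + 2) : Nat) : Int) ((j : Int) + 1) 1).map
              (fun x => (x, true))).foldl (pvApply prices) (c, s),
           ((j : Int) + 1 - (i : Int), 0)) := by
  intro len
  induction len with
  | zero =>
    intro k c s hik hkj
    have hmk := Nat.le_max_left k (i + 2)
    rw [PySem.List.pyRange_one_eq_nil (by omega : ((j : Int) + 1) ≤ (k : Int)),
        PySem.List.pyRange_one_eq_nil (by omega : ((j : Int) + 1) ≤ ((max k (i + 2) : Nat) : Int))]
    simp only [List.map_nil, List.foldl_nil]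
    have he : (k : Int) - (i : Int) = (j : Int) + 1 - (i : Int) := by omega
    rw [he]
  | succ m ih =>
    intro k c s hik hkj
    have hkj' : k ≤ j := by omega
    rw [PySem.List.pyRange_one_cons (by omega : (k : Int) < (j : Int) + 1)]
    simp only [List.foldl_cons]
    rw [pvAStep_up prices c s ((k : Int) - (i : Int)) 0 (k : Int) (hsteps k hik hkj')]
    by_cases hk2 : i + 2 ≤ k
    · rw [Nat.max_eq_left hk2]
      rw [PySem.List.pyRange_one_cons (by omega : (k : Int) < (j : Int) + 1)]
      simp only [List.map_cons, List.foldl_cons]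
      have hX : (if (k : Int) - (i : Int) + 1 ≥ 3 ∧ s > 0
            then (c + s * pvG prices (k : Int), 0) else (c, s))
          = pvApply prices (c, s) ((k : Int), true) := by
        rw [pvApply_sell]
        split_ifs <;> first | rfl | (exfalso; omega)
      rw [hX]
      rcases hev : pvApply prices (c, s) ((k : Int), true) with ⟨c', s'⟩
      have hrec := ih (k + 1) c' s' (by omega) (by omega)
      rw [Nat.max_eq_left (by omega : i + 2 ≤ k + 1)] at hrec
      have e1 : ((k + 1 : Nat) : Int) = (k : Int) + 1 := by push_cast; ring
      rw [e1] at hrec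
      have e2 : (k : Int) + 1 - (i : Int) = (k : Int) - (i : Int) + 1 := by ring
      rw [e2] at hrec
      exact hrec
    · rw [Nat.max_eq_right (by omega : k ≤ i + 2)]
      rw [if_neg (by omega : ¬ ((k : Int) - (i : Int) + 1 ≥ 3 ∧ s > 0))]
      have hrec := ih (k + 1) c s (by omega) (by omega)
      rw [Nat.max_eq_right (by omega : k + 1 ≤ i + 2)] at hrec
      have e1 : ((k + 1 : Nat) : Int) = (k : Int) + 1 := by push_cast; ring
      rw [e1] at hrec
      have e2 : (k : Int) + 1 - (i : Int) = (k : Int) - (i : Int) + 1 := by ring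
      rw [e2] at hrec
      exact hrec

-- the symmetric statement for a down run: buy events
theorem pvTail_down (prices : List Int) (i j : Nat)
    (hsteps : ∀ t : Nat, i < t → t ≤ j → pvG prices (t : Int) < pvG prices ((t : Int) - 1)) :
    ∀ (len k : Nat) (c s : Int), i < k → k + len = j + 1 →
      (PySem.List.pyRange (k : Int) ((j : Int) + 1) 1).foldl (pvAStep prices)
          ((c, s), (0, (k : Int) - (i : Int)))
        = (((PySem.List.pyRange ((max k (i + 2) : Nat) : Int) ((j : Int) + 1) 1).map
              (fun x => (x, false))).foldl (pvApply prices) (c, s),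
           (0, (j : Int) + 1 - (i : Int))) := by
  intro len
  induction len with
  | zero =>
    intro k c s hik hkj
    have hmk := Nat.le_max_left k (i + 2)
    rw [PySem.List.pyRange_one_eq_nil (by omega : ((j : Int) + 1) ≤ (k : Int)),
        PySem.List.pyRange_one_eq_nil (by omega : ((j : Int) + 1) ≤ ((max k (i + 2) : Nat) : Int))]
    simp only [List.map_nil, List.foldl_nil]
    have he : (k : Int) - (i : Int) = (j : Int) + 1 - (i : Int) := by omega
    rw [he]
  | succ m ih =>
    intro k c s hik hkj
    have hkj' : k ≤ j := by omega
    rw [PySem.List.pyRange_one_cons (by omega : (k : Int) < (j : Int) + 1)]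
    simp only [List.foldl_cons]
    rw [pvAStep_down prices c s 0 ((k : Int) - (i : Int)) (k : Int) (hsteps k hik hkj')]
    by_cases hk2 : i + 2 ≤ k
    · rw [Nat.max_eq_left hk2]
      rw [PySem.List.pyRange_one_cons (by omega : (k : Int) < (j : Int) + 1)]
      simp only [List.map_cons, List.foldl_cons]
      have hX : (if (k : Int) - (i : Int) + 1 ≥ 3 ∧ c ≥ pvG prices (k : Int)
            then (PySem.Int.mod c (pvG prices (k : Int)),
                  s + PySem.Int.floordiv c (pvG prices (k : Int)))
            else (c, s))
          = pvApply prices (c, s) ((k : Int), false) := by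
        rw [pvApply_buy]
        split_ifs <;> first | rfl | (exfalso; omega)
      rw [hX]
      rcases hev : pvApply prices (c, s) ((k : Int), false) with ⟨c', s'⟩
      have hrec := ih (k + 1) c' s' (by omega) (by omega)
      rw [Nat.max_eq_left (by omega : i + 2 ≤ k + 1)] at hrec
      have e1 : ((k + 1 : Nat) : Int) = (k : Int) + 1 := by push_cast; ring
      rw [e1] at hrec
      have e2 : (k : Int) + 1 - (i : Int) = (k : Int) - (i : Int) + 1 := by ring
      rw [e2] at hrec
      exact hrec
    · rw [Nat.max_eq_right (by omega : k ≤ i + 2)]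
      rw [if_neg (by omega : ¬ ((k : Int) - (i : Int) + 1 ≥ 3 ∧ c ≥ pvG prices (k : Int)))]
      have hrec := ih (k + 1) c s (by omega) (by omega)
      rw [Nat.max_eq_right (by omega : k + 1 ≤ i + 2)] at hrec
      have e1 : ((k + 1 : Nat) : Int) = (k : Int) + 1 := by push_cast; ring
      rw [e1] at hrec
      have e2 : (k : Int) + 1 - (i : Int) = (k : Int) - (i : Int) + 1 := by ring
      rw [e2] at hrec
      exact hrec

-- A's fold from any run boundary equals B's replay of the remaining events
theorem pvOuter (prices : List Int) (i : Nat) (c s u d : Int) (h1 : 1 ≤ i)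
    (hinv : i < prices.length →
      (pvG prices (i : Int) > pvG prices ((i : Int) - 1) → u = 0) ∧
      (pvG prices (i : Int) < pvG prices ((i : Int) - 1) → d = 0)) :
    ((PySem.List.pyRange (i : Int) (prices.length : Int) 1).foldl (pvAStep prices)
        ((c, s), (u, d))).1
      = (pvEvents prices i).foldl (pvApply prices) (c, s) := by
  by_cases hn : i < prices.length
  · rcases lt_trichotomy (pvG prices ((i : Int) - 1)) (pvG prices (i : Int)) with hup | heq | hdn
    · -- an up run starts at day i
      have hu0 : u = 0 := (hinv hn).1 hup
      subst hu0
      have hij : i ≤ pvRunEnd prices i true := pvRunEnd_ge prices i true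
      have hjn : pvRunEnd prices i true < prices.length := pvRunEnd_lt prices i true hn
      set jj := pvRunEnd prices i true with hjj
      have hsteps : ∀ t : Nat, i < t → t ≤ jj → pvG prices (t : Int) > pvG prices ((t : Int) - 1) := by
        intro t hti htj
        have hs := pvRunEnd_steps prices i true (t - 1) (by omega) (by omega)
        simp only [if_true] at hs
        have e : ((t - 1 : Nat) : Int) = (t : Int) - 1 := by omega
        rw [e] at hs
        have e2 : (t : Int) - 1 + 1 = (t : Int) := by ring
        rw [e2] at hs
        exact hs
      rw [PySem.List.pyRange_one_append (i : Int) ((jj : Int) + 1) (prices.length : Int)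
            (by omega) (by omega)]
      rw [List.foldl_append]
      rw [PySem.List.pyRange_one_cons (by omega : (i : Int) < (jj : Int) + 1)]
      simp only [List.foldl_cons]
      rw [pvAStep_up prices c s 0 d (i : Int) hup]
      rw [if_neg (by omega : ¬ ((0 : Int) + 1 ≥ 3 ∧ s > 0))]
      have htail := pvTail_up prices i jj hsteps (jj - i) (i + 1) c s (by omega) (by omega)
      rw [Nat.max_eq_right (by omega : i + 1 ≤ i + 2)] at htail
      have e1 : ((i + 1 : Nat) : Int) = (i : Int) + 1 := by push_cast; ring
      rw [e1] at htail
      have e2 : (i : Int) + 1 - (i : Int) = 0 + 1 := by ring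
      rw [e2] at htail
      rw [htail]
      rcases hev : ((PySem.List.pyRange (((i + 2 : Nat)) : Int) ((jj : Int) + 1) 1).map
          (fun x => (x, true))).foldl (pvApply prices) (c, s) with ⟨c', s'⟩
      have hinv' : jj + 1 < prices.length →
          (pvG prices ((jj + 1 : Nat) : Int) > pvG prices (((jj + 1 : Nat) : Int) - 1) →
            (jj : Int) + 1 - (i : Int) = 0) ∧
          (pvG prices ((jj + 1 : Nat) : Int) < pvG prices (((jj + 1 : Nat) : Int) - 1) →
            (0 : Int) = 0) := by
        intro hlt
        constructor
        · intro hup'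
          exfalso
          have hmax := pvRunEnd_max prices i true (by omega)
          simp only [if_true] at hmax
          have e : ((jj + 1 : Nat) : Int) = (jj : Int) + 1 := by push_cast; ring
          rw [e] at hup'
          have e2 : (jj : Int) + 1 - 1 = (jj : Int) := by ring
          rw [e2] at hup'
          exact hmax hup'
        · intro _; rfl
      have hrec := pvOuter prices (jj + 1) c' s' ((jj : Int) + 1 - (i : Int)) 0 (by omega) hinv'
      have e4 : ((jj + 1 : Nat) : Int) = (jj : Int) + 1 := by push_cast; ring
      rw [e4] at hrec
      rw [hrec]
      conv_rhs => rw [pvEvents]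
      rw [dif_pos hn, if_pos hup]
      dsimp only
      rw [← hjj]
      rw [List.foldl_append]
      have e5 : ((i + 2 : Nat) : Int) = (i : Int) + 2 := by push_cast; ring
      rw [e5] at hev
      rw [hev]
    · -- a flat day: counters reset, no trade, no event
      rw [PySem.List.pyRange_one_cons (by omega : (i : Int) < (prices.length : Int))]
      simp only [List.foldl_cons]
      rw [pvAStep_flat prices c s u d (i : Int) heq.symm]
      have hrec := pvOuter prices (i + 1) c s 0 0 (by omega)
        (fun _ => ⟨fun _ => rfl, fun _ => rfl⟩)
      have e1 : ((i + 1 : Nat) : Int) = (i : Int) + 1 := by push_cast; ring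
      rw [e1] at hrec
      rw [hrec]
      conv_rhs => rw [pvEvents]
      rw [dif_pos hn, if_neg (by omega : ¬ pvG prices (i : Int) > pvG prices ((i : Int) - 1)),
          if_neg (by omega : ¬ pvG prices (i : Int) < pvG prices ((i : Int) - 1))]
    · -- a down run starts at day i
      have hd0 : d = 0 := (hinv hn).2 hdn
      subst hd0
      have hij : i ≤ pvRunEnd prices i false := pvRunEnd_ge prices i false
      have hjn : pvRunEnd prices i false < prices.length := pvRunEnd_lt prices i false hn
      set jj := pvRunEnd prices i false with hjj
      have hsteps : ∀ t : Nat, i < t → t ≤ jj → pvG prices (t : Int) < pvG prices ((t : Int) - 1) := by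
        intro t hti htj
        have hs := pvRunEnd_steps prices i false (t - 1) (by omega) (by omega)
        have e : ((t - 1 : Nat) : Int) = (t : Int) - 1 := by omega
        rw [e] at hs
        have e2 : (t : Int) - 1 + 1 = (t : Int) := by ring
        rw [e2] at hs
        exact hs
      rw [PySem.List.pyRange_one_append (i : Int) ((jj : Int) + 1) (prices.length : Int)
            (by omega) (by omega)]
      rw [List.foldl_append]
      rw [PySem.List.pyRange_one_cons (by omega : (i : Int) < (jj : Int) + 1)]
      simp only [List.foldl_cons]
      rw [pvAStep_down prices c s u 0 (i : Int) hdn]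
      rw [if_neg (by omega : ¬ ((0 : Int) + 1 ≥ 3 ∧ c ≥ pvG prices (i : Int)))]
      have htail := pvTail_down prices i jj hsteps (jj - i) (i + 1) c s (by omega) (by omega)
      rw [Nat.max_eq_right (by omega : i + 1 ≤ i + 2)] at htail
      have e1 : ((i + 1 : Nat) : Int) = (i : Int) + 1 := by push_cast; ring
      rw [e1] at htail
      have e2 : (i : Int) + 1 - (i : Int) = 0 + 1 := by ring
      rw [e2] at htail
      rw [htail]
      rcases hev : ((PySem.List.pyRange (((i + 2 : Nat)) : Int) ((jj : Int) + 1) 1).map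
          (fun x => (x, false))).foldl (pvApply prices) (c, s) with ⟨c', s'⟩
      have hinv' : jj + 1 < prices.length →
          (pvG prices ((jj + 1 : Nat) : Int) > pvG prices (((jj + 1 : Nat) : Int) - 1) →
            (0 : Int) = 0) ∧
          (pvG prices ((jj + 1 : Nat) : Int) < pvG prices (((jj + 1 : Nat) : Int) - 1) →
            (jj : Int) + 1 - (i : Int) = 0) := by
        intro hlt
        constructor
        · intro _; rfl
        · intro hdn'
          exfalso
          have hmax := pvRunEnd_max prices i false (by omega)
          have e : ((jj + 1 : Nat) : Int) = (jj : Int) + 1 := by push_cast; ring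
          rw [e] at hdn'
          have e2 : (jj : Int) + 1 - 1 = (jj : Int) := by ring
          rw [e2] at hdn'
          exact hmax hdn'
      have hrec := pvOuter prices (jj + 1) c' s' 0 ((jj : Int) + 1 - (i : Int))
        (by omega) hinv'
      have e4 : ((jj + 1 : Nat) : Int) = (jj : Int) + 1 := by push_cast; ring
      rw [e4] at hrec
      rw [hrec]
      conv_rhs => rw [pvEvents]
      rw [dif_pos hn, if_neg (by omega : ¬ pvG prices (i : Int) > pvG prices ((i : Int) - 1)),
          if_pos hdn]
      dsimp only
      rw [← hjj]
      rw [List.foldl_append]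
      have e5 : ((i + 2 : Nat) : Int) = (i : Int) + 2 := by push_cast; ring
      rw [e5] at hev
      rw [hev]
  · rw [PySem.List.pyRange_one_eq_nil (by omega : (prices.length : Int) ≤ (i : Int))]
    rw [pvEvents, dif_neg hn]
    rfl
termination_by prices.length - i
decreasing_by all_goals omega

-- the timing folds agree for every list
theorem pvTiming_eq (prices : List Int) (c : Int) :
    ((PySem.List.pyRange 1 prices.length 1).foldl (pvAStep prices) ((c, 0), 0, 0)).1
      = (pvEvents prices 1).foldl (pvApply prices) (c, 0) := by
  have h := pvOuter prices 1 c 0 0 0 (le_refl 1)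
    (fun _ => ⟨fun _ => rfl, fun _ => rfl⟩)
  simpa using h

-- ===== VERDICT (by name: the statement is the Claim_ definition above) =====
theorem bnp_vs_timing_spec : Claim_equal_bnp_vs_timing := by
  intro cash prices _ _
  show bnp_vs_timing cash prices = bnp_vs_timing_alt cash prices
  unfold bnp_vs_timing bnp_vs_timing_alt
  dsimp only
  rw [pvTiming_eq prices cash]
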